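-- pv_equiv track=rewrite | github.com/Davidleeops/cranegenius | contact_intelligence/scripts/build_legacy_outbound.py | map_headers
-- ===== SOURCE A (Python) =====
-- ALIASES = {
--     "company_name": ["company_name","company","account","employer","organization","business_name"],
--     "email": ["email","email_address","work_email","primary_email"],
--     "first_name": ["first_name","firstname","given_name"],
--     "last_name": ["last_name","lastname","surname"],
--     "contact_name": ["contact_name","full_name","name","person_name"],
--     "city": ["city","town","locality"],
--     "state": ["state","state_code","region"],
--     "province": ["province","province_code"],
--     "country": ["country","country_code"],
--     "domain": ["domain","company_domain","email_domain","website_domain"],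
--     "website": ["website","company_website","url","company_url"],
--     "title": ["title","job_title","role","position","department"],
--     "notes": ["notes","description","industry","label"],
-- }
--
-- def map_headers(fieldnames):
--     low = {f.lower().strip(): f for f in fieldnames}
--     out = {}
--     for k, opts in ALIASES.items():
--         for o in opts:
--             if o in low:
--                 out[k] = low[o]
--                 break
--     return out
-- ===== SOURCE B (Python) =====
-- ALIASES = {
--     "company_name": ["company_name","company","account","employer","organization","business_name"],
--     "email": ["email","email_address","work_email","primary_email"],
--     "first_name": ["first_name","firstname","given_name"],
--     "last_name": ["last_name","lastname","surname"],
--     "contact_name": ["contact_name","full_name","name","person_name"],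
--     "city": ["city","town","locality"],
--     "state": ["state","state_code","region"],
--     "province": ["province","province_code"],
--     "country": ["country","country_code"],
--     "domain": ["domain","company_domain","email_domain","website_domain"],
--     "website": ["website","company_website","url","company_url"],
--     "title": ["title","job_title","role","position","department"],
--     "notes": ["notes","description","industry","label"],
-- }
--
-- # reverse index: lowercased alias -> (canonical key, rank in its alias list)
-- REVERSE = {o: (k, i) for k, opts in ALIASES.items() for i, o in enumerate(opts)}
--
-- def map_headers(fieldnames):
--     best = {}  # canonical key -> (rank, fieldname)
--     for f in fieldnames:
--         hit = REVERSE.get(f.lower().strip())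
--         if hit is not None:
--             k, r = hit
--             cur = best.get(k)
--             if cur is None or r <= cur[0]:
--                 best[k] = (r, f)
--     return {k: best[k][1] for k in ALIASES if k in best}
-- ===== Notes on version B (the rewrite author's own statement) =====
-- stated objective: alternative
-- what changed: A builds a lowercased-header dict and scans the alias table key by key taking the first alias present; B builds a reverse index (alias -> (key, rank)) once and makes a single pass over the fieldnames, keeping per key the best-ranked alias (<= so a later duplicate fieldname wins), then emits the result in table order.
import Mathlib
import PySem

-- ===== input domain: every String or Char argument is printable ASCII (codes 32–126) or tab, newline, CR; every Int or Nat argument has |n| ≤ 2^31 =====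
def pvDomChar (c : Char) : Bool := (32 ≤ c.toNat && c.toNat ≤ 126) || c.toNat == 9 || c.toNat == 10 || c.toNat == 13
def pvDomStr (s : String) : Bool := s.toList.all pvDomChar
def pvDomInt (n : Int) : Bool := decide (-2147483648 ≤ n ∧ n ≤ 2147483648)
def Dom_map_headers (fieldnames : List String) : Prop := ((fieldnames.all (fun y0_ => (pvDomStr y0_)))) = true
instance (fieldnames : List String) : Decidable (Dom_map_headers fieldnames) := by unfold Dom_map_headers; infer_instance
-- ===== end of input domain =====

set_option maxRecDepth 100000

-- B replaces A's scan over the alias table (with a header dict) by a single pass over the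
-- fieldnames against a prebuilt reverse index keeping the best-ranked alias per canonical key
-- (objective: alternative decomposition, same cost).

-- the ALIASES table (module constant of Source A)
def pvAliases : List (String × List String) := [
  ("company_name", ["company_name","company","account","employer","organization","business_name"]),
  ("email", ["email","email_address","work_email","primary_email"]),
  ("first_name", ["first_name","firstname","given_name"]),
  ("last_name", ["last_name","lastname","surname"]),
  ("contact_name", ["contact_name","full_name","name","person_name"]),
  ("city", ["city","town","locality"]),
  ("state", ["state","state_code","region"]),
  ("province", ["province","province_code"]),
  ("country", ["country","country_code"]),
  ("domain", ["domain","company_domain","email_domain","website_domain"]),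
  ("website", ["website","company_website","url","company_url"]),
  ("title", ["title","job_title","role","position","department"]),
  ("notes", ["notes","description","industry","label"])]

-- f.lower().strip()
def pvNorm (f : String) : String := PySem.Str.strip (PySem.Str.lower f)

-- ===== PORT A =====
-- inner 'for o in opts: if o in low: out[k] = low[o]; break'
def pvFindLoop (k : String) (opts : List String) (low : PySem.Dict String String)
    (out : PySem.Dict String String) : PySem.Dict String String :=
  match opts with
  | [] => out
  | o :: rest =>
    match low.get? o with
    | some v => out.insert k v
    | none => pvFindLoop k rest low out

def map_headers (fieldnames : List String) : List (String × String) :=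
  let low : PySem.Dict String String :=
    fieldnames.foldl (fun d f => d.insert (pvNorm f) f) PySem.Dict.empty
  (pvAliases.foldl (fun out p => pvFindLoop p.1 p.2 low out)
    (PySem.Dict.empty : PySem.Dict String String)).items

-- ===== PORT B =====
-- REVERSE = {o: (k, i) for k, opts in ALIASES.items() for i, o in enumerate(opts)}
def pvReverse : PySem.Dict String (String × Int) :=
  pvAliases.foldl
    (fun d p => (PySem.List.enumerate p.2 0).foldl (fun d io => d.insert io.2 (p.1, io.1)) d)
    PySem.Dict.empty

-- body of B's loop over fieldnames
def pvBestStep (best : PySem.Dict String (Int × String)) (f : String) :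
    PySem.Dict String (Int × String) :=
  match pvReverse.get? (pvNorm f) with
  | none => best
  | some kr =>
    match best.get? kr.1 with
    | none => best.insert kr.1 (kr.2, f)
    | some cur => if kr.2 ≤ cur.1 then best.insert kr.1 (kr.2, f) else best

def map_headers_alt (fieldnames : List String) : List (String × String) :=
  let best := fieldnames.foldl pvBestStep PySem.Dict.empty
  (pvAliases.foldl (fun out p =>
      match best.get? p.1 with
      | some c => out.insert p.1 c.2
      | none => out)
    (PySem.Dict.empty : PySem.Dict String String)).items

-- ===== PRECONDITION & SPEC =====
def Spec_map_headers (fieldnames : List String) (out : List (String × String)) : Prop := out = map_headers_alt fieldnames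
instance (fieldnames : List String) (out : List (String × String)) : Decidable (Spec_map_headers fieldnames out) := by unfold Spec_map_headers; infer_instance

-- ===== CLAIM (what is proved, stated in full; the proofs are below) =====
def Claim_equal_map_headers : Prop := ∀ (fieldnames : List String), Dom_map_headers fieldnames → Spec_map_headers fieldnames (map_headers fieldnames)

-- ===== LEMMAS AND PROOFS =====

-- the last field of fs whose lower().strip() is o (what A's 'low' dict stores at o)
def pvLast (fs : List String) (o : String) : Option String :=
  match fs with
  | [] => none
  | f :: rest =>
    match pvLast rest o with
    | some g => some g
    | none => if pvNorm f = o then some f else none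

-- first alias (from rank i on) with a match under g, together with its rank
def pvRankedF (g : String → Option String) : List String → Int → Option (Int × String)
  | [], _ => none
  | o :: rest, i =>
    match g o with
    | some v => some (i, v)
    | none => pvRankedF g rest (i + 1)

-- B's per-key view of pvBestStep
def pvStepK (k : String) (s : Option (Int × String)) (f : String) : Option (Int × String) :=
  match pvReverse.get? (pvNorm f) with
  | none => s
  | some kr =>
    if kr.1 = k then
      match s with
      | none => some (kr.2, f)
      | some cur => if kr.2 ≤ cur.1 then some (kr.2, f) else s
    else s

theorem pvLow_get (fs : List String) (d : PySem.Dict String String) (o : String) :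
    (fs.foldl (fun d f => d.insert (pvNorm f) f) d).get? o = (pvLast fs o).or (d.get? o) := by
  induction fs generalizing d with
  | nil => simp [pvLast]
  | cons f rest ih =>
    simp only [List.foldl_cons, ih, pvLast, PySem.Dict.get?_insert]
    cases h : pvLast rest o with
    | some g => simp
    | none =>
      by_cases he : pvNorm f = o
      · simp [he]
      · rw [if_neg (fun hc : o = pvNorm f => he hc.symm)]
        simp [he]

theorem pvFindLoop_eq (k : String) (opts : List String) (low : PySem.Dict String String)
    (out : PySem.Dict String String) (i : Int) :
    pvFindLoop k opts low out =
      match pvRankedF (fun o => low.get? o) opts i with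
      | some q => out.insert k q.2
      | none => out := by
  induction opts generalizing i with
  | nil => rfl
  | cons o rest ih =>
    have hR : pvRankedF (fun o => low.get? o) (o :: rest) i
        = match low.get? o with
          | some v => some (i, v)
          | none => pvRankedF (fun o => low.get? o) rest (i + 1) := by
      rw [pvRankedF]
    rw [pvFindLoop, hR]
    cases h : low.get? o with
    | some v => rfl
    | none => exact ih (i + 1)

theorem pvRankedF_ge (g : String → Option String) (l : List String) (i : Int)
    (p : Int × String) (h : pvRankedF g l i = some p) : i ≤ p.1 := by
  induction l generalizing i with
  | nil => rw [pvRankedF] at h; simp at h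
  | cons o rest ih =>
    rw [pvRankedF] at h
    cases hg : g o with
    | some v => rw [hg] at h; injection h with h; subst h; simp
    | none => rw [hg] at h; have := ih (i + 1) h; omega

theorem pvRankedF_congr (g g' : String → Option String) (l : List String) (i : Int)
    (h : ∀ o ∈ l, g o = g' o) : pvRankedF g l i = pvRankedF g' l i := by
  induction l generalizing i with
  | nil => rfl
  | cons o rest ih =>
    rw [pvRankedF, pvRankedF, h o (by simp)]
    cases g' o with
    | some v => rfl
    | none => exact ih (i + 1) (fun o ho => h o (by simp [ho]))

theorem pvRankedF_none (l : List String) (i : Int) : pvRankedF (fun _ => none) l i = none := by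
  induction l generalizing i with
  | nil => rfl
  | cons o rest ih => rw [pvRankedF]; exact ih (i + 1)

theorem pvLast_append (fs : List String) (f o : String) :
    pvLast (fs ++ [f]) o = if pvNorm f = o then some f else pvLast fs o := by
  induction fs with
  | nil => simp [pvLast]
  | cons g rest ih =>
    simp only [List.cons_append, pvLast, ih]
    by_cases he : pvNorm f = o <;> simp [he]

theorem pvRankedF_update (g : String → Option String) (s v : String) (opts : List String)
    (i : Int) (j : Nat) (hnd : opts.Nodup) (hj : opts[j]? = some s) :
    pvRankedF (fun o => if s = o then some v else g o) opts i =
      match pvRankedF g opts i with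
      | none => some (i + j, v)
      | some p => if i + (j : Int) ≤ p.1 then some (i + j, v) else some p := by
  induction opts generalizing i j with
  | nil => simp at hj
  | cons o rest ih =>
    cases j with
    | zero =>
      simp only [List.getElem?_cons_zero, Option.some.injEq] at hj
      subst hj
      have hL : pvRankedF (fun o1 => if o = o1 then some v else g o1) (o :: rest) i
          = some (i, v) := by
        rw [pvRankedF, if_pos rfl]
      have hR : pvRankedF g (o :: rest) i
          = match g o with
            | some w => some (i, w)
            | none => pvRankedF g rest (i + 1) := by
        rw [pvRankedF]
      rw [hL, hR]
      cases hg : g o with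
      | some w => simp
      | none =>
        cases hr : pvRankedF g rest (i + 1) with
        | none => simp
        | some p =>
          have hge := pvRankedF_ge g rest (i + 1) p hr
          have hle : i ≤ p.1 := by omega
          simp [hle]
    | succ j' =>
      simp only [List.getElem?_cons_succ] at hj
      have hsmem : s ∈ rest := List.mem_of_getElem? hj
      have hne : ¬ (s = o) := by
        rintro rfl; exact (List.nodup_cons.mp hnd).1 hsmem
      have hL : pvRankedF (fun o1 => if s = o1 then some v else g o1) (o :: rest) i
          = match g o with
            | some w => some (i, w)
            | none => pvRankedF (fun o1 => if s = o1 then some v else g o1) rest (i + 1) := by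
        rw [pvRankedF, if_neg hne]
      have hR : pvRankedF g (o :: rest) i
          = match g o with
            | some w => some (i, w)
            | none => pvRankedF g rest (i + 1) := by
        rw [pvRankedF]
      rw [hL, hR]
      cases hg : g o with
      | some w =>
        dsimp only
        rw [if_neg (show ¬ (i + ((j' + 1 : Nat) : Int) ≤ i) from by push_cast; omega)]
      | none =>
        rw [ih (i + 1) j' (List.nodup_cons.mp hnd).2 hj]
        have hcast : i + 1 + (j' : Int) = i + ((j' + 1 : Nat) : Int) := by push_cast; omega
        cases pvRankedF g rest (i + 1) with
        | none => simp [hcast]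
        | some p => rw [hcast]

theorem pvBest_get (k : String) (fs : List String) (d : PySem.Dict String (Int × String)) :
    (fs.foldl pvBestStep d).get? k = fs.foldl (pvStepK k) (d.get? k) := by
  induction fs generalizing d with
  | nil => rfl
  | cons f rest ih =>
    have hstep : (pvBestStep d f).get? k = pvStepK k (d.get? k) f := by
      simp only [pvBestStep, pvStepK]
      cases hrev : pvReverse.get? (pvNorm f) with
      | none => rfl
      | some kr =>
        dsimp only
        by_cases hk : kr.1 = k
        · subst hk
          cases hc : d.get? kr.1 with
          | none => simp [hc, PySem.Dict.get?_insert]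
          | some cur =>
            simp only [hc, if_pos rfl]
            by_cases hle : kr.2 ≤ cur.1 <;> simp [hle, PySem.Dict.get?_insert, hc]
        · have hkk : ¬ (k = kr.1) := fun hh => hk hh.symm
          rw [if_neg hk]
          cases hc : d.get? kr.1 with
          | none =>
            show (d.insert kr.1 (kr.2, f)).get? k = d.get? k
            rw [PySem.Dict.get?_insert, if_neg hkk]
          | some cur =>
            by_cases hle : kr.2 ≤ cur.1
            · show (if kr.2 ≤ cur.1 then d.insert kr.1 (kr.2, f) else d).get? k = d.get? k
              rw [if_pos hle, PySem.Dict.get?_insert, if_neg hkk]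
            · show (if kr.2 ≤ cur.1 then d.insert kr.1 (kr.2, f) else d).get? k = d.get? k
              rw [if_neg hle]
    rw [List.foldl_cons, List.foldl_cons, ih, hstep]

-- pvReverse written out (one kernel evaluation of the fold, reused below)
def pvRevItemsLit : List (String × String × Int) := [
  ("company_name", ("company_name", 0)),
  ("company", ("company_name", 1)),
  ("account", ("company_name", 2)),
  ("employer", ("company_name", 3)),
  ("organization", ("company_name", 4)),
  ("business_name", ("company_name", 5)),
  ("email", ("email", 0)),
  ("email_address", ("email", 1)),
  ("work_email", ("email", 2)),
  ("primary_email", ("email", 3)),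
  ("first_name", ("first_name", 0)),
  ("firstname", ("first_name", 1)),
  ("given_name", ("first_name", 2)),
  ("last_name", ("last_name", 0)),
  ("lastname", ("last_name", 1)),
  ("surname", ("last_name", 2)),
  ("contact_name", ("contact_name", 0)),
  ("full_name", ("contact_name", 1)),
  ("name", ("contact_name", 2)),
  ("person_name", ("contact_name", 3)),
  ("city", ("city", 0)),
  ("town", ("city", 1)),
  ("locality", ("city", 2)),
  ("state", ("state", 0)),
  ("state_code", ("state", 1)),
  ("region", ("state", 2)),
  ("province", ("province", 0)),
  ("province_code", ("province", 1)),
  ("country", ("country", 0)),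
  ("country_code", ("country", 1)),
  ("domain", ("domain", 0)),
  ("company_domain", ("domain", 1)),
  ("email_domain", ("domain", 2)),
  ("website_domain", ("domain", 3)),
  ("website", ("website", 0)),
  ("company_website", ("website", 1)),
  ("url", ("website", 2)),
  ("company_url", ("website", 3)),
  ("title", ("title", 0)),
  ("job_title", ("title", 1)),
  ("role", ("title", 2)),
  ("position", ("title", 3)),
  ("department", ("title", 4)),
  ("notes", ("notes", 0)),
  ("description", ("notes", 1)),
  ("industry", ("notes", 2)),
  ("label", ("notes", 3))]

theorem pvRevItems_eq : pvReverse.items = pvRevItemsLit := by decide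

theorem pvReverse_keys_nodup : pvReverse.keys.Nodup := by
  simp only [PySem.Dict.keys, pvRevItems_eq]
  decide

theorem pvMem_enumerate_of_getElem? (l : List String) (s0 : Int) (j : Nat) (s : String)
    (hj : l[j]? = some s) : (s0 + j, s) ∈ PySem.List.enumerate l s0 := by
  induction l generalizing j s0 with
  | nil => simp at hj
  | cons o rest ih =>
    rw [PySem.List.enumerate_cons]
    cases j with
    | zero => simp_all
    | succ j' =>
      simp only [List.getElem?_cons_succ] at hj
      have h2 := ih (s0 + 1) j' hj
      have hc : s0 + ((j' + 1 : Nat) : Int) = s0 + 1 + (j' : Int) := by push_cast; omega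
      rw [hc]
      exact List.mem_cons_of_mem _ h2

-- per canonical key: B's best-rank state equals the ranked first-alias search over pvLast
theorem pvPerKey (k : String) (opts : List String) (hnd : opts.Nodup)
    (hA : ∀ q ∈ PySem.List.enumerate opts 0, (q.2, (k, q.1)) ∈ pvReverse.items)
    (hB : ∀ p ∈ pvReverse.items, p.2.1 = k →
      0 ≤ p.2.2 ∧ opts[p.2.2.toNat]? = some p.1)
    (fs : List String) :
    fs.foldl (pvStepK k) none = pvRankedF (pvLast fs) opts 0 := by
  rw [← List.reverse_reverse fs]
  generalize fs.reverse = r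
  induction r with
  | nil =>
    simp only [List.reverse_nil, List.foldl_nil]
    exact (((pvRankedF_congr (pvLast []) (fun _ => none) opts 0 (fun o _ => rfl)).trans
      (pvRankedF_none opts 0)).symm)
  | cons f t ih =>
    rw [List.reverse_cons, List.foldl_append, List.foldl_cons, List.foldl_nil]
    have hfun : pvLast (t.reverse ++ [f]) = fun o => if pvNorm f = o then some f else pvLast t.reverse o :=
      funext (pvLast_append t.reverse f)
    rw [hfun]
    simp only [pvStepK]
    cases hrev : pvReverse.get? (pvNorm f) with
    | none =>
      have hnm : pvNorm f ∉ pvReverse.keys :=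
        (PySem.Dict.get?_eq_none_iff_not_mem_keys _ _).mp hrev
      have hnot : ∀ o ∈ opts, pvNorm f ≠ o := by
        intro o ho he
        obtain ⟨j, hjlt, hjo⟩ := List.getElem_of_mem ho
        have hq : ((0:Int) + j, o) ∈ PySem.List.enumerate opts 0 :=
          pvMem_enumerate_of_getElem? opts 0 j o (by simp [hjo, hjlt])
        have hmem := hA _ hq
        exact hnm (by rw [he]; exact PySem.Dict.mem_keys_of_mem_items _ hmem)
      rw [pvRankedF_congr _ (pvLast t.reverse) opts 0 (by intro o ho; simp [hnot o ho]), ih]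
    | some kr =>
      dsimp only
      have hitems : (pvNorm f, kr) ∈ pvReverse.items :=
        (PySem.Dict.get?_eq_some_iff_mem_items pvReverse (pvNorm f) kr pvReverse_keys_nodup).mp hrev
      by_cases hk : kr.1 = k
      · obtain ⟨hpos, hget⟩ := hB _ hitems hk
        rw [if_pos hk, ih,
          pvRankedF_update (pvLast t.reverse) (pvNorm f) f opts 0 kr.2.toNat hnd hget]
        have hkr2 : ((kr.2.toNat : Nat) : Int) = kr.2 := Int.toNat_of_nonneg hpos
        cases pvRankedF (pvLast t.reverse) opts 0 with
        | none => simp [hkr2]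
        | some p => simp [hkr2]
      · have hnot : ∀ o ∈ opts, pvNorm f ≠ o := by
          intro o ho he
          obtain ⟨j, hjlt, hjo⟩ := List.getElem_of_mem ho
          have hq : ((0:Int) + j, o) ∈ PySem.List.enumerate opts 0 :=
            pvMem_enumerate_of_getElem? opts 0 j o (by simp [hjo, hjlt])
          have hmem := hA _ hq
          have h2 : pvReverse.get? o = some (k, (0:Int) + j) :=
            (PySem.Dict.get?_eq_some_iff_mem_items pvReverse o (k, (0:Int) + j)
              pvReverse_keys_nodup).mpr hmem
          rw [← he, hrev] at h2
          exact hk (by rw [Option.some.inj h2])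
        rw [if_neg hk,
          pvRankedF_congr _ (pvLast t.reverse) opts 0 (by intro o ho; simp [hnot o ho]), ih]

-- the alias table's per-key facts pvPerKey needs, all at once (decidable: everything concrete)
theorem pvTableFacts : ∀ p ∈ pvAliases, p.2.Nodup ∧
    (∀ q ∈ PySem.List.enumerate p.2 0, (q.2, (p.1, q.1)) ∈ pvRevItemsLit) ∧
    (∀ r ∈ pvRevItemsLit, r.2.1 = p.1 →
      0 ≤ r.2.2 ∧ p.2[r.2.2.toNat]? = some r.1) := by decide

-- ===== VERDICT (by name: the statement is the Claim_ definition above) =====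
theorem map_headers_spec : Claim_equal_map_headers := by
  intro fieldnames _
  unfold Spec_map_headers
  simp only [map_headers, map_headers_alt]
  congr 1
  apply PySem.List.foldl_congr_mem
  intro out p hp
  have hlow : (fun o => (fieldnames.foldl (fun d f => d.insert (pvNorm f) f)
      (PySem.Dict.empty : PySem.Dict String String)).get? o) = pvLast fieldnames := by
    funext o
    rw [pvLow_get, PySem.Dict.get?_empty]
    cases pvLast fieldnames o <;> rfl
  rw [pvFindLoop_eq p.1 p.2 _ out 0, hlow, pvBest_get, PySem.Dict.get?_empty]
  obtain ⟨h1, h2, h3⟩ := pvTableFacts p hp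
  rw [pvPerKey p.1 p.2 h1
    (fun q hq => by rw [pvRevItems_eq]; exact h2 q hq)
    (fun r hr hk => h3 r (by rw [pvRevItems_eq] at hr; exact hr) hk) fieldnames]
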